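-- pv_equiv track=rewrite | github.com/PatrickD3003/board_dataset_generator | detector.py | map_coordinates
-- ===== SOURCE A (Python) =====
-- def map_coordinates(coordinates, color):
--     """
--     1. input coordinate data from detect_circle()
--     2. predict the type of holds based on the coordinate.
--     3. return list of holds used in the screenshot
--     example:
--     a = map_coordinates(board_coordinate)
--     a = {
--     {start : False, goal : True, holds: J18},
--     {start : False, goal : False, holds: E15},
--     {start : False, goal : False, holds: D13},
--     {start : True, goal : False, holds: A4}
--     }
--     """
--     # define the labels.
--     hold_labels_column = list("ABCDEFGHIJK")
--     hold_labels_row = [i for i in range(18, 0, -1)]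
--     # a list containing all the labels detected from the coordinates
--     hold_labels = []
--     # pick sample hold's coordination
--     # (column, row)
--     A18_coordinate = (142, 128)
--     B18_coordinate = (232, 128)
--     A17_coordinate = (142, 218)
--     # count the distance between holds, both the column and row
--     column_distance = B18_coordinate[0] - A18_coordinate[0]
--     row_distance = A17_coordinate[1] - A18_coordinate[1]
--
--     for coordinate in coordinates:
--         column_label = ""
--         row_label = ""
--         # check column
--         i = 0
--         while (i < len(hold_labels_column)):
--             column_scan = A18_coordinate[0] + column_distance * i
--             if (column_scan - 10) <= coordinate[0] <= (column_scan + 10):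
--                 column_label = hold_labels_column[i]
--                 break
--             i += 1
--
--         # check row
--         i = 0
--         while (i < len(hold_labels_row)):
--             row_scan = A18_coordinate[1] + row_distance * i
--             if (row_scan - 40) <= coordinate[1] <= (row_scan + 40):
--                 row_label = hold_labels_row[i]
--                 break
--             i += 1
--
--         # create the (column + row) label
--         label = column_label + str(row_label)
--         hold_labels.append(label)
--
--     return hold_labels
-- ===== SOURCE B (Python) =====
-- def map_coordinates(coordinates, color):
--     labels = []
--     for x, y in coordinates:
--         c = (x - 97) // 90  # nearest column index: round((x-142)/90)
--         col = "ABCDEFGHIJK"[c] if 0 <= c < 11 and abs(x - (142 + 90 * c)) <= 10 else ""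
--         r = (y - 83) // 90  # nearest row index: round((y-128)/90)
--         row = str(18 - r) if 0 <= r < 18 and abs(y - (128 + 90 * r)) <= 40 else ""
--         labels.append(col + row)
--     return labels
-- ===== Notes on version B (the rewrite author's own statement) =====
-- stated objective: simpler
-- what changed: Replaces the two inner while-scans over all candidate grid lines with direct index arithmetic: floor-divide the offset to get the nearest column/row index and one tolerance check, so each coordinate is labelled in O(1) instead of scanning up to 11+18 windows.
import Mathlib
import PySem

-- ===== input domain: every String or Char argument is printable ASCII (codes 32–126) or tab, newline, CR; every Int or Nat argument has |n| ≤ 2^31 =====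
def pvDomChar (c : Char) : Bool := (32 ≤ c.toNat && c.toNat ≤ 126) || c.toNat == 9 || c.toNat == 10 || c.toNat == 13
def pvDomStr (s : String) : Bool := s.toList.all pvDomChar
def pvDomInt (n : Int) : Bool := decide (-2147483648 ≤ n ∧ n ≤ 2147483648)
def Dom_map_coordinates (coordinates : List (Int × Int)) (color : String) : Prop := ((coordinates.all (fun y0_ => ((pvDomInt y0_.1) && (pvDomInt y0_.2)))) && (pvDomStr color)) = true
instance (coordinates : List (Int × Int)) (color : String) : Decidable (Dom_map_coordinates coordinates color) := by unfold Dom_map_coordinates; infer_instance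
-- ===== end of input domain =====

-- B replaces A's two inner while-scans by direct O(1) index arithmetic per coordinate (objective: simpler).

-- ===== PORT A =====
-- the 'while (i < len(hold_labels_column)): …' column scan with break
def pvWhileCol (cols : List Char) (a18x colDist : Int) (x : Int) (i : Nat) : String :=
  if h : i < cols.length then
    let column_scan := a18x + colDist * (i : Int)
    if column_scan - 10 ≤ x ∧ x ≤ column_scan + 10 then (cols.get ⟨i, h⟩).toString
    else pvWhileCol cols a18x colDist x (i + 1)
  else ""
termination_by cols.length - i

-- the 'while (i < len(hold_labels_row)): …' row scan with break; str(row_label) applied on the hit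
def pvWhileRow (rows : List Int) (a18y rowDist : Int) (y : Int) (i : Nat) : String :=
  if h : i < rows.length then
    let row_scan := a18y + rowDist * (i : Int)
    if row_scan - 40 ≤ y ∧ y ≤ row_scan + 40 then PySem.Int.toStr (rows.get ⟨i, h⟩)
    else pvWhileRow rows a18y rowDist y (i + 1)
  else ""
termination_by rows.length - i

def map_coordinates (coordinates : List (Int × Int)) (color : String) : List String :=
  let hold_labels_column := "ABCDEFGHIJK".toList
  let hold_labels_row := PySem.List.pyRange 18 0 (-1)
  let A18_coordinate : Int × Int := (142, 128)
  let B18_coordinate : Int × Int := (232, 128)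
  let A17_coordinate : Int × Int := (142, 218)
  let column_distance := B18_coordinate.1 - A18_coordinate.1
  let row_distance := A17_coordinate.2 - A18_coordinate.2
  coordinates.foldl (fun hold_labels coordinate =>
    let column_label := pvWhileCol hold_labels_column A18_coordinate.1 column_distance coordinate.1 0
    let row_label := pvWhileRow hold_labels_row A18_coordinate.2 row_distance coordinate.2 0
    hold_labels ++ [column_label ++ row_label]) []

-- ===== PORT B =====
def pvColAlt (x : Int) : String :=
  let c := PySem.Int.floordiv (x - 97) 90
  if 0 ≤ c ∧ c < 11 ∧ |x - (142 + 90 * c)| ≤ 10 then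
    ("ABCDEFGHIJK".toList.getD c.toNat ' ').toString
  else ""

def pvRowAlt (y : Int) : String :=
  let r := PySem.Int.floordiv (y - 83) 90
  if 0 ≤ r ∧ r < 18 ∧ |y - (128 + 90 * r)| ≤ 40 then PySem.Int.toStr (18 - r)
  else ""

def map_coordinates_alt (coordinates : List (Int × Int)) (color : String) : List String :=
  coordinates.map (fun p => pvColAlt p.1 ++ pvRowAlt p.2)

-- ===== PRECONDITION & SPEC =====
def Spec_map_coordinates (coordinates : List (Int × Int)) (color : String) (out : List String) : Prop := out = map_coordinates_alt coordinates color
instance (coordinates : List (Int × Int)) (color : String) (out : List String) : Decidable (Spec_map_coordinates coordinates color out) := by unfold Spec_map_coordinates; infer_instance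

-- ===== CLAIM (what is proved, stated in full; the proofs are below) =====
def Claim_equal_map_coordinates : Prop := ∀ (coordinates : List (Int × Int)) (color : String), Dom_map_coordinates coordinates color → Spec_map_coordinates coordinates color (map_coordinates coordinates color)

-- ===== LEMMAS AND PROOFS =====

lemma pv_fdiv_col {x : Int} {i : Nat} (h1 : 142 + 90 * (i : Int) - 10 ≤ x) (h2 : x ≤ 142 + 90 * (i : Int) + 10) :
    PySem.Int.floordiv (x - 97) 90 = (i : Int) := by
  rw [PySem.Int.floordiv_eq_iff_of_pos (by norm_num)]
  omega

lemma pv_fdiv_row {y : Int} {i : Nat} (h1 : 128 + 90 * (i : Int) - 40 ≤ y) (h2 : y ≤ 128 + 90 * (i : Int) + 40) :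
    PySem.Int.floordiv (y - 83) 90 = (i : Int) := by
  rw [PySem.Int.floordiv_eq_iff_of_pos (by norm_num)]
  omega

lemma pv_rows_get : ∀ i, (h : i < (PySem.List.pyRange 18 0 (-1)).length) →
    (PySem.List.pyRange 18 0 (-1)).get ⟨i, h⟩ = 18 - (i : Int) := by decide

lemma pv_col_scan (x : Int) : ∀ k i, i + k = 11 →
    (∀ j : Nat, j < i → ¬ (142 + 90 * (j : Int) - 10 ≤ x ∧ x ≤ 142 + 90 * (j : Int) + 10)) →
    pvWhileCol "ABCDEFGHIJK".toList 142 90 x i = pvColAlt x := by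
  intro k
  induction k with
  | zero =>
    intro i hk hmiss
    rw [pvWhileCol]
    have hlen : ("ABCDEFGHIJK".toList).length = 11 := by decide
    rw [dif_neg (by omega)]
    unfold pvColAlt
    rw [if_neg]
    rintro ⟨hc0, hc11, habs⟩
    set c := PySem.Int.floordiv (x - 97) 90 with hc
    have := hmiss c.toNat (by omega)
    rw [abs_le] at habs
    apply this
    constructor <;> omega
  | succ k ih =>
    intro i hk hmiss
    rw [pvWhileCol]
    have hlen : ("ABCDEFGHIJK".toList).length = 11 := by decide
    rw [dif_pos (by omega)]
    by_cases hw : 142 + 90 * (i : Int) - 10 ≤ x ∧ x ≤ 142 + 90 * (i : Int) + 10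
    · rw [if_pos hw]
      have hfd := pv_fdiv_col hw.1 hw.2
      unfold pvColAlt
      rw [if_pos]
      · rw [hfd]
        simp only [Int.toNat_natCast]
        congr 1
        exact (List.getD_eq_getElem _ _ (by omega)).symm
      · refine ⟨by omega, by omega, ?_⟩
        rw [hfd, abs_le]; omega
    · rw [if_neg (by exact_mod_cast hw)]
      apply ih (i + 1) (by omega)
      intro j hj
      rcases Nat.lt_or_ge j i with h | h
      · exact hmiss j h
      · have : j = i := by omega
        subst this; exact hw

lemma pv_row_scan (y : Int) : ∀ k i, i + k = 18 →
    (∀ j : Nat, j < i → ¬ (128 + 90 * (j : Int) - 40 ≤ y ∧ y ≤ 128 + 90 * (j : Int) + 40)) →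
    pvWhileRow (PySem.List.pyRange 18 0 (-1)) 128 90 y i = pvRowAlt y := by
  intro k
  induction k with
  | zero =>
    intro i hk hmiss
    rw [pvWhileRow]
    have hlen : (PySem.List.pyRange 18 0 (-1)).length = 18 := by decide
    rw [dif_neg (by omega)]
    unfold pvRowAlt
    rw [if_neg]
    rintro ⟨hc0, hc18, habs⟩
    set r := PySem.Int.floordiv (y - 83) 90 with hr
    have := hmiss r.toNat (by omega)
    rw [abs_le] at habs
    apply this
    constructor <;> omega
  | succ k ih =>
    intro i hk hmiss
    rw [pvWhileRow]
    have hlen : (PySem.List.pyRange 18 0 (-1)).length = 18 := by decide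
    rw [dif_pos (by omega)]
    by_cases hw : 128 + 90 * (i : Int) - 40 ≤ y ∧ y ≤ 128 + 90 * (i : Int) + 40
    · rw [if_pos hw]
      have hfd := pv_fdiv_row hw.1 hw.2
      unfold pvRowAlt
      rw [if_pos]
      · rw [hfd, pv_rows_get i (by omega)]
      · refine ⟨by omega, by omega, ?_⟩
        rw [hfd, abs_le]; omega
    · rw [if_neg (by exact_mod_cast hw)]
      apply ih (i + 1) (by omega)
      intro j hj
      rcases Nat.lt_or_ge j i with h | h
      · exact hmiss j h
      · have : j = i := by omega
        subst this; exact hw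

lemma pv_foldl_append {α : Type} (f : α → String) :
    ∀ (l : List α) (acc : List String),
      l.foldl (fun a p => a ++ [f p]) acc = acc ++ l.map f := by
  intro l
  induction l with
  | nil => simp
  | cons h t ih => intro acc; simp [List.foldl, ih, List.append_assoc]

-- ===== VERDICT (by name: the statement is the Claim_ definition above) =====
theorem map_coordinates_spec : Claim_equal_map_coordinates := by
  intro coordinates color _
  unfold Spec_map_coordinates map_coordinates map_coordinates_alt
  simp only []
  rw [pv_foldl_append (fun coordinate : Int × Int =>
        pvWhileCol "ABCDEFGHIJK".toList 142 (232 - 142) coordinate.1 0 ++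
          pvWhileRow (PySem.List.pyRange 18 0 (-1)) 128 (218 - 128) coordinate.2 0) coordinates []]
  simp only [List.nil_append]
  apply List.map_congr_left
  intro p _
  have h1 : (232 - 142 : Int) = 90 := by norm_num
  have h2 : (218 - 128 : Int) = 90 := by norm_num
  rw [h1, h2, pv_col_scan p.1 11 0 rfl (by intro j hj; omega),
      pv_row_scan p.2 18 0 rfl (by intro j hj; omega)]
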